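-- pv_equiv track=rewrite | github.com/Bex-kex/CW3 | wavefront_solver.py | get_squares
-- ===== SOURCE A (Python) =====
-- def split_into_squares(sub_grid, n):
--     """
--     The "split_into_squares" function defines the anchor points in the grid, which will be used to split the grid
--     into equally-sized squares. For instance, in a 9x9 grid with 9 rows and 9 columns, the anchor points will be 0,
--     3, and 6. These anchor points determine where the grid should be split to form 3x3 squares
--     :param sub_grid: row or column dimension of the grid
--     :param n: number of rows or columns
--     :return: list of anchor points
--     """
--     split = []
--     # The variable boundary is set to 0 and acts as a starting point
--     boundary = 0
--     # The loop below defines the number of anchor points depending on the dimensions of the grid.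
--     for i in range(sub_grid):
--         split.append(boundary)
--         # This line increments the "boundary" variable by the width of the grid.
--         boundary += n // sub_grid
--
--     return split
--
-- def find_n_rows_cols(grid):
--     """
--     The "find_n_rows_cols" function returns the number of rows and columns in the grid
--     :param grid: given grid
--     :return: number of rows and columns
--     """
--     n_rows = len(grid)
--     n_cols = len(grid[0])
--     return n_rows, n_cols
--
-- def get_squares(grid, n_sub_rows, n_sub_cols):
--     """
--     The "get_squares" function divides the grid in equally-sized squares
--     :param grid: given grid
--     :param n_sub_rows: row dimension of the grid
--     :param n_sub_cols: column dimension of the grid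
--     :return: list where each sublist represents one square in the grid
--     """
--     # The number of columns and rows is defined.
--     n_rows, n_cols = find_n_rows_cols(grid)
--     squares = []
--
--     # The anchor points for the rows and columns are calculated.
--     row_split = split_into_squares(n_sub_rows, n_rows)
--     col_split = split_into_squares(n_sub_cols, n_cols)
--
--     # The nested loop below forms squares by adding a certain number to an anchor positions of the grid.
--     for row in row_split:
--         for col in col_split:
--             square = []
--             # The maximum number being added to an anchor position depends on the width of a square in the grid. The
--             # loop picks one row first and then goes through all the column values in that row.
--             for i in range(n_rows // n_sub_rows):
--                 for j in range(n_cols // n_sub_cols):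
--                     square.append(grid[row + i][col + j])
--             squares.append(square)
--
--     return squares
-- ===== SOURCE B (Python) =====
-- def get_squares(grid, n_sub_rows, n_sub_cols):
--     n_rows = len(grid)
--     n_cols = len(grid[0])
--     if n_sub_rows <= 0 or n_sub_cols <= 0:
--         return []
--     rh = n_rows // n_sub_rows
--     ch = n_cols // n_sub_cols
--     squares = []
--     for br in range(n_sub_rows):
--         band = grid[br * rh:(br + 1) * rh]
--         for bc in range(n_sub_cols):
--             sq = []
--             for row in band:
--                 sq.extend(row[bc * ch:(bc + 1) * ch])
--             squares.append(sq)
--     return squares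
-- ===== Notes on version B (the rewrite author's own statement) =====
-- stated objective: simpler
-- what changed: A gathers each square with four nested index loops over anchor points computed by split_into_squares; B drops the anchor lists entirely and builds each square by slicing a band of rows and slicing each row, with no per-element index arithmetic.
import Mathlib
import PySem

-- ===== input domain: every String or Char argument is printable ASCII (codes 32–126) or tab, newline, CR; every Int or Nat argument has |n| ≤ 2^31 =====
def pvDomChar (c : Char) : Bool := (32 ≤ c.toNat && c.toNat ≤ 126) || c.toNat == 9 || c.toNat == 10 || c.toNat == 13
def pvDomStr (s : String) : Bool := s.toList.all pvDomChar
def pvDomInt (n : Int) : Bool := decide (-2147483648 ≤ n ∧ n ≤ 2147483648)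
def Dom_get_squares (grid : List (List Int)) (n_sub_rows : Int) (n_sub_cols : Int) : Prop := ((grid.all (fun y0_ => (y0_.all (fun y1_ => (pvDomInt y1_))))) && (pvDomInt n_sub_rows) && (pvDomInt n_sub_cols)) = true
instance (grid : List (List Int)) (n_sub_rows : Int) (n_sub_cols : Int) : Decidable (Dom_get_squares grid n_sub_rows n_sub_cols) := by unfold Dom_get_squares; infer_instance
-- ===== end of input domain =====

-- B replaces A's four-level anchor-index gather by band/row slicing (no per-element index
-- arithmetic): simpler, same asymptotic cost.

-- ===== PORT A =====
def pySplitIntoSquares (sub_grid : Int) (n : Int) : List Int :=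
  ((PySem.List.pyRange 0 sub_grid).foldl
    (fun (st : List Int × Int) _i => (st.1 ++ [st.2], st.2 + PySem.Int.floordiv n sub_grid))
    ([], 0)).1

def pyFindNRowsCols (grid : List (List Int)) : Int × Int :=
  ((grid.length : Int), (((PySem.List.pyGet? grid 0).getD []).length : Int))

def get_squares (grid : List (List Int)) (n_sub_rows : Int) (n_sub_cols : Int) : List (List Int) :=
  let nrc := pyFindNRowsCols grid
  let n_rows := nrc.1
  let n_cols := nrc.2
  let row_split := pySplitIntoSquares n_sub_rows n_rows
  let col_split := pySplitIntoSquares n_sub_cols n_cols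
  row_split.foldl (fun squares row =>
    col_split.foldl (fun squares col =>
      squares ++ [(PySem.List.pyRange 0 (PySem.Int.floordiv n_rows n_sub_rows)).foldl (fun sq i =>
        (PySem.List.pyRange 0 (PySem.Int.floordiv n_cols n_sub_cols)).foldl (fun sq j =>
          sq ++ [(PySem.List.pyGet? ((PySem.List.pyGet? grid (row + i)).getD []) (col + j)).getD 0]) sq) []]) squares) []

-- ===== PORT B =====
def get_squares_alt (grid : List (List Int)) (n_sub_rows : Int) (n_sub_cols : Int) : List (List Int) :=
  let n_rows : Int := grid.length
  let n_cols : Int := ((PySem.List.pyGet? grid 0).getD []).length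
  if n_sub_rows ≤ 0 ∨ n_sub_cols ≤ 0 then []
  else
    let rh := PySem.Int.floordiv n_rows n_sub_rows
    let ch := PySem.Int.floordiv n_cols n_sub_cols
    (PySem.List.pyRange 0 n_sub_rows).foldl (fun squares br =>
      let band := PySem.List.slice grid (some (br * rh)) (some ((br + 1) * rh))
      (PySem.List.pyRange 0 n_sub_cols).foldl (fun squares bc =>
        squares ++ [band.foldl (fun sq row =>
          sq ++ PySem.List.slice row (some (bc * ch)) (some ((bc + 1) * ch))) []]) squares) []

-- ===== PRECONDITION & SPEC =====
-- Pre_ excludes exactly the inputs where A raises: the empty grid (grid[0] IndexError) and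
-- grids whose rows inside the covered block region are too short for the column span
-- (grid[row+i][col+j] IndexError).
def Pre_get_squares (grid : List (List Int)) (n_sub_rows : Int) (n_sub_cols : Int) : Prop :=
  grid ≠ [] ∧ (1 ≤ n_sub_rows → 1 ≤ n_sub_cols →
    ∀ row ∈ grid.take (n_sub_rows * PySem.Int.floordiv (grid.length : Int) n_sub_rows).toNat,
      n_sub_cols * PySem.Int.floordiv ((grid.headD []).length : Int) n_sub_cols ≤ (row.length : Int))
instance (grid : List (List Int)) (n_sub_rows : Int) (n_sub_cols : Int) : Decidable (Pre_get_squares grid n_sub_rows n_sub_cols) := by unfold Pre_get_squares; infer_instance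

def pvWitness_get_squares : List (List Int) × Int × Int := ([[1, 2], [3, 4]], 2, 2)

def Spec_get_squares (grid : List (List Int)) (n_sub_rows : Int) (n_sub_cols : Int) (out : List (List Int)) : Prop := out = get_squares_alt grid n_sub_rows n_sub_cols
instance (grid : List (List Int)) (n_sub_rows : Int) (n_sub_cols : Int) (out : List (List Int)) : Decidable (Spec_get_squares grid n_sub_rows n_sub_cols out) := by unfold Spec_get_squares; infer_instance

-- ===== CLAIM (what is proved, stated in full; the proofs are below) =====
def Claim_equal_get_squares : Prop := ∀ (grid : List (List Int)) (n_sub_rows : Int) (n_sub_cols : Int), Dom_get_squares grid n_sub_rows n_sub_cols → Pre_get_squares grid n_sub_rows n_sub_cols → Spec_get_squares grid n_sub_rows n_sub_cols (get_squares grid n_sub_rows n_sub_cols)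

-- ===== LEMMAS AND PROOFS =====

-- A's split_into_squares loop: an arithmetic progression.
lemma foldl_split {α : Type} (l : List α) (acc : List Int) (bdy d : Int) :
    ((l.foldl (fun (st : List Int × Int) _i => (st.1 ++ [st.2], st.2 + d)) (acc, bdy)).1)
      = acc ++ (List.range l.length).map (fun (k : Nat) => bdy + (k : Int) * d) := by
  induction l generalizing acc bdy with
  | nil => simp
  | cons x t ih =>
      rw [List.foldl_cons, ih, List.length_cons, List.range_succ_eq_map,
        List.map_cons, List.map_map]
      simp only [Nat.cast_zero, zero_mul, add_zero, List.append_assoc, List.singleton_append]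
      congr 2
      apply List.map_congr_left
      intro k _
      simp only [Function.comp_apply]
      push_cast; ring

-- a clamped drop/take window whose whole span exists is a window of getDs
lemma take_drop_eq_map_range {α : Type} (xs : List α) (d k : Nat) (dflt : α)
    (h : d + k ≤ xs.length) :
    (xs.drop d).take k = (List.range k).map (fun j => xs.getD (d + j) dflt) := by
  apply List.ext_getElem
  · simp; omega
  · intro j h1 h2
    have hj : j < k := by simp at h1; omega
    have hdj : d + j < xs.length := by omega
    simp [List.getD_eq_getElem?_getD, List.getElem?_eq_getElem hdj]

-- pyRange 0 s for any Int s
lemma pyRange_zero_toNat (s : Int) :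
    PySem.List.pyRange 0 s = (List.range s.toNat).map (fun (k : Nat) => (k : Int)) := by
  rcases le_or_gt 0 s with h | h
  · have := PySem.List.pyRange_zero_natCast s.toNat
    rwa [Int.toNat_of_nonneg h] at this
  · have h0 : s.toNat = 0 := by omega
    rw [h0]
    simp [PySem.List.pyRange]
    omega

lemma get0_eq_headD {α : Type} (xs : List α) (d : α) :
    (PySem.List.pyGet? xs (0 : Int)).getD d = xs.headD d := by
  have : (0 : Int) = ((0 : Nat) : Int) := by norm_num
  rw [this, PySem.List.pyGet?_natCast]
  cases xs <;> simp

-- A's split_into_squares as a closed form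
lemma split_eq (s n : Int) :
    pySplitIntoSquares s n
      = (List.range s.toNat).map (fun (k : Nat) => (k : Int) * PySem.Int.floordiv n s) := by
  unfold pySplitIntoSquares
  rw [pyRange_zero_toNat, List.foldl_map, foldl_split]
  simp

-- the common canonical form: block (k,l) gathers window (i,j)
def canon (grid : List (List Int)) (a b rh ch : Nat) : List (List Int) :=
  (List.range a).flatMap (fun k => (List.range b).map (fun l =>
    (List.range rh).flatMap (fun i => (List.range ch).map (fun j =>
      (grid.getD (k * rh + i) []).getD (l * ch + j) 0))))

lemma A_canon (grid : List (List Int)) (a b : Nat) :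
    get_squares grid (a : Int) (b : Int)
      = canon grid a b (grid.length / a) ((grid.headD []).length / b) := by
  simp only [get_squares, pyFindNRowsCols]
  rw [get0_eq_headD, split_eq, split_eq]
  simp only [PySem.List.foldl_append_singleton_eq_map, PySem.List.foldl_append_eq_flatMap,
    List.nil_append, PySem.Int.floordiv_natCast, Int.toNat_natCast, pyRange_zero_toNat,
    List.flatMap_map, List.map_map, canon]
  apply List.flatMap_congr; intro k hk
  apply List.map_congr_left; intro l hl
  simp only [Function.comp_apply]
  apply List.flatMap_congr; intro i hi
  apply List.map_congr_left; intro j hj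
  rw [show ((k : Int) * ((grid.length / a : Nat) : Int) + (i : Int))
        = ((k * (grid.length / a) + i : Nat) : Int) by push_cast; ring,
    PySem.List.pyGet?_natCast]
  simp only [Function.comp_apply]
  rw [show ((l : Int) * (((grid.headD []).length / b : Nat) : Int) + (j : Int))
        = ((l * ((grid.headD []).length / b) + j : Nat) : Int) by push_cast; ring,
    PySem.List.pyGet?_natCast]
  simp [List.getD_eq_getElem?_getD]

lemma B_canon (grid : List (List Int)) (a b : Nat) (ha : 1 ≤ a) (hb : 1 ≤ b)
    (hrows : ∀ row ∈ grid.take (a * (grid.length / a)),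
      b * ((grid.headD []).length / b) ≤ row.length) :
    get_squares_alt grid (a : Int) (b : Int)
      = canon grid a b (grid.length / a) ((grid.headD []).length / b) := by
  have hguard : ¬((a : Int) ≤ 0 ∨ (b : Int) ≤ 0) := by
    push Not; constructor <;> [exact_mod_cast ha; exact_mod_cast hb]
  simp only [get_squares_alt]
  rw [get0_eq_headD, if_neg hguard]
  simp only [PySem.Int.floordiv_natCast, pyRange_zero_toNat, Int.toNat_natCast,
    PySem.List.foldl_append_singleton_eq_map, PySem.List.foldl_append_eq_flatMap,
    List.nil_append, List.flatMap_map, List.map_map, canon]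
  set nr := grid.length with hnr
  set nc := (grid.headD []).length with hnc
  set rh := nr / a with hrh
  set ch := nc / b with hch
  have harh : a * rh ≤ nr := by rw [hrh, Nat.mul_comm]; exact Nat.div_mul_le_self nr a
  apply List.flatMap_congr; intro k hk
  have hk' : k < a := List.mem_range.mp hk
  have hband : PySem.List.slice grid (some ((k : Int) * (rh : Int)))
      (some (((k : Int) + 1) * (rh : Int)))
      = (List.range rh).map (fun i => grid.getD (k * rh + i) []) := by
    rw [show ((k : Int) * (rh : Int)) = ((k * rh : Nat) : Int) by push_cast; ring,
      show (((k : Int) + 1) * (rh : Int)) = (((k * rh : Nat) : Int) + (rh : Int)) by push_cast; ring,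
      PySem.List.slice_natCast_add]
    exact take_drop_eq_map_range grid (k * rh) rh [] (by
      have hx : (k + 1) * rh ≤ a * rh := Nat.mul_le_mul_right rh (by omega)
      have hy : (k + 1) * rh = k * rh + rh := by ring
      omega)
  apply List.map_congr_left; intro l hl
  have hl' : l < b := List.mem_range.mp hl
  simp only [Function.comp_apply, hband, List.flatMap_map]
  apply List.flatMap_congr; intro i hi
  have hi' : i < rh := List.mem_range.mp hi
  have hidx : k * rh + i < a * rh := by
    have hx : (k + 1) * rh ≤ a * rh := Nat.mul_le_mul_right rh (by omega)
    have hy : (k + 1) * rh = k * rh + rh := by ring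
    omega
  have hmem : grid.getD (k * rh + i) [] ∈ grid.take (a * rh) := by
    have hlt : k * rh + i < nr := by omega
    rw [List.getD_eq_getElem?_getD, List.getElem?_eq_getElem hlt]
    simp only [Option.getD_some]
    exact List.mem_take_iff_getElem.mpr ⟨k * rh + i, by omega, rfl⟩
  have hlen : b * ch ≤ (grid.getD (k * rh + i) []).length := hrows _ hmem
  rw [show ((l : Int) * (ch : Int)) = ((l * ch : Nat) : Int) by push_cast; ring,
    show (((l : Int) + 1) * (ch : Int)) = (((l * ch : Nat) : Int) + (ch : Int)) by push_cast; ring,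
    PySem.List.slice_natCast_add]
  exact take_drop_eq_map_range _ (l * ch) ch 0 (by
    have hx : (l + 1) * ch ≤ b * ch := Nat.mul_le_mul_right ch (by omega)
    have hy : (l + 1) * ch = l * ch + ch := by ring
    omega)

-- ===== VERDICT =====
theorem get_squares_spec : Claim_equal_get_squares := by
  intro grid nsr nsc _ hpre
  unfold Spec_get_squares
  rcases le_or_gt nsr 0 with h1 | h1
  · -- row_split is empty, B's guard fires
    simp only [get_squares, get_squares_alt]
    rw [split_eq nsr]
    have h0 : nsr.toNat = 0 := by omega
    simp [h0, h1]
  rcases le_or_gt nsc 0 with h2 | h2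
  · -- col_split is empty: A's inner loop never appends
    simp only [get_squares, get_squares_alt, pyFindNRowsCols]
    rw [split_eq nsc]
    have h0 : nsc.toNat = 0 := by omega
    simp [h0, h2]
  · -- both positive: both sides equal the canonical gather
    obtain ⟨a, rfl⟩ : ∃ a : Nat, nsr = (a : Int) := ⟨nsr.toNat, by omega⟩
    obtain ⟨b, rfl⟩ : ∃ b : Nat, nsc = (b : Int) := ⟨nsc.toNat, by omega⟩
    have ha : 1 ≤ a := by exact_mod_cast h1
    have hb : 1 ≤ b := by exact_mod_cast h2
    have hrows : ∀ row ∈ grid.take (a * (grid.length / a)),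
        b * ((grid.headD []).length / b) ≤ row.length := by
      intro row hrow
      have hm : row ∈ grid.take (((a : Int) * PySem.Int.floordiv (grid.length : Int) (a : Int)).toNat) := by
        rw [PySem.Int.floordiv_natCast,
          show ((a : Int) * ((grid.length / a : Nat) : Int)).toNat = a * (grid.length / a) by
            rw [← Nat.cast_mul, Int.toNat_natCast]]
        exact hrow
      have h := hpre.2 (by exact_mod_cast h1) (by exact_mod_cast h2) row hm
      rw [PySem.Int.floordiv_natCast] at h
      exact_mod_cast h
    rw [A_canon, B_canon grid a b ha hb hrows]
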